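-- pv_equiv track=rewrite | github.com/aditya-prakash-singh/POTD | Day36/main.py | solve
-- ===== SOURCE A (Python) =====
-- def solve(A, B):
--     ans=[]
--     for i in range(1,len(A)):
--         A[i] = max(A[i - 1], A[i])
--     for i in range(len(B)):
--         semians = -1
--         l,r= 0,len(A)-1
--         while l<=r:
--             m=l+(r-l)//2
--             if A[m]>=B[i]:
--                 semians=m
--                 r=m-1
--             else:
--                 l=m+1
--         ans.append(semians)
--     return ans
-- ===== SOURCE B (Python) =====
-- def solve(A, B):
--     # same in-place prefix-max mutation of A as the original
--     for i in range(1, len(A)):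
--         A[i] = max(A[i - 1], A[i])
--     n = len(A)
--     ans = [-1] * len(B)
--     p = 0
--     for j in sorted(range(len(B)), key=lambda j: B[j]):
--         v = B[j]
--         while p < n and A[p] < v:
--             p += 1
--         ans[j] = p if p < n else -1
--     return ans
-- ===== Notes on version B (the rewrite author's own statement) =====
-- stated objective: faster
-- what changed: Replaces the per-query binary search with one sorted two-pointer sweep: query indices are sorted by value and a single pointer advances monotonically over the prefix-maxed array, answers scattered back to original positions.
import Mathlib
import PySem

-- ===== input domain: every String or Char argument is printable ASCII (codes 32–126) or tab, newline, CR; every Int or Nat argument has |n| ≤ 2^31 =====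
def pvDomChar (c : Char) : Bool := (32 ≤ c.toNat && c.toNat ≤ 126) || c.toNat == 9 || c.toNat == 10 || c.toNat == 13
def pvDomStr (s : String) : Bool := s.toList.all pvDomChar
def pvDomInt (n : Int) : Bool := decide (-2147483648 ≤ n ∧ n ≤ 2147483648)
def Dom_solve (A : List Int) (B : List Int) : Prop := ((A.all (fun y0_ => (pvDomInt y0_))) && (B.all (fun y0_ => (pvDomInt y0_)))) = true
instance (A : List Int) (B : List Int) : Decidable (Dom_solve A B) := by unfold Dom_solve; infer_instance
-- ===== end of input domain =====

-- B replaces A's per-query binary search by a single two-pointer sweep over queries sorted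
-- by value; both mutate the Python argument A in place identically (the in-place prefix-max
-- loop is kept verbatim), so the proved equivalence of return values is the whole story.

-- ===== PORT A =====
-- the shared in-place prefix-max loop 'for i in range(1, len(A)): A[i] = max(A[i-1], A[i])'
-- (literally identical lines in Source A and Source B)
def pmax (A : List Int) : List Int :=
  (PySem.List.pyRange 1 (PySem.List.len A) 1).foldl
    (fun xs i =>
      PySem.List.pySetD xs i (max (PySem.List.pyGetD xs (i - 1) 0) (PySem.List.pyGetD xs i 0))) A

-- the 'while l <= r' binary-search loop, state (semians, l, r)
def bsLoop (P : List Int) (v : Int) (s l r : Int) : Int :=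
  if h : l ≤ r then
    if v ≤ PySem.List.pyGetD P (l + PySem.Int.floordiv (r - l) 2) 0 then
      bsLoop P v (l + PySem.Int.floordiv (r - l) 2) l (l + PySem.Int.floordiv (r - l) 2 - 1)
    else
      bsLoop P v s (l + PySem.Int.floordiv (r - l) 2 + 1) r
  else s
termination_by (r + 1 - l).toNat
decreasing_by
  · have h2 : PySem.Int.floordiv (r - l) 2 = (r - l) / 2 :=
      PySem.Int.floordiv_eq_ediv_of_pos (by omega)
    rw [h2]; omega
  · have h2 : PySem.Int.floordiv (r - l) 2 = (r - l) / 2 :=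
      PySem.Int.floordiv_eq_ediv_of_pos (by omega)
    rw [h2]; omega

def solve (A : List Int) (B : List Int) : List Int :=
  let P := pmax A
  (PySem.List.pyRange 0 (PySem.List.len B) 1).foldl
    (fun ans i => ans ++ [bsLoop P (PySem.List.pyGetD B i 0) (-1) 0 (PySem.List.len P - 1)]) []

-- ===== PORT B =====
-- the 'while p < n and A[p] < v: p += 1' pointer advance
def adv (P : List Int) (n v p : Int) : Int :=
  if h : p < n ∧ PySem.List.pyGetD P p 0 < v then adv P n v (p + 1) else p
termination_by (n - p).toNat
decreasing_by omega

def solve_alt (A : List Int) (B : List Int) : List Int :=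
  let P := pmax A
  let n := PySem.List.len P
  ((PySem.List.sorted (PySem.List.pyRange 0 (PySem.List.len B) 1)
      (fun j => PySem.List.pyGetD B j 0) false).foldl
    (fun st j =>
      let p := adv P n (PySem.List.pyGetD B j 0) st.1
      (p, PySem.List.pySetD st.2 j (if p < n then p else -1)))
    ((0 : Int), List.replicate B.length (-1))).2

-- ===== PRECONDITION & SPEC =====
def Spec_solve (A : List Int) (B : List Int) (out : List Int) : Prop := out = solve_alt A B
instance (A : List Int) (B : List Int) (out : List Int) : Decidable (Spec_solve A B out) := by unfold Spec_solve; infer_instance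

-- ===== CLAIM (what is proved, stated in full; the proofs are below) =====
def Claim_equal_solve : Prop := ∀ (A : List Int) (B : List Int), Dom_solve A B → Spec_solve A B (solve A B)

-- ===== LEMMAS AND PROOFS =====

-- prefix-max, written structurally: pm m xs carries the running maximum m
def pm (m : Int) : List Int → List Int
  | [] => []
  | x :: xs => max m x :: pm (max m x) xs

-- first index whose value is ≥ v
def fge (v : Int) : List Int → Option Nat
  | [] => none
  | x :: xs => if v ≤ x then some 0 else (fge v xs).map (· + 1)

def F (P : List Int) (v : Int) : Int :=
  match fge v P with
  | some k => (k : Int)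
  | none => -1

theorem fge_none_iff (v : Int) (P : List Int) :
    fge v P = none ↔ ∀ i : Nat, i < P.length → P.getD i 0 < v := by
  induction P with
  | nil => simp [fge]
  | cons x xs ih =>
    by_cases hx : v ≤ x
    · simp only [fge, if_pos hx]
      constructor
      · intro h; cases h
      · intro h; have := h 0 (by simp); simp [List.getD] at this; omega
    · simp only [fge, if_neg hx, Option.map_eq_none_iff, ih]
      constructor
      · intro h i hi
        cases i with
        | zero => simpa [List.getD] using (by omega : x < v)
        | succ n => simpa [List.getD] using h n (by simpa using hi)
      · intro h i hi
        have := h (i + 1) (by simpa using hi)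
        simpa [List.getD] using this

theorem fge_some_iff (v : Int) (P : List Int) (k : Nat) :
    fge v P = some k ↔ k < P.length ∧ v ≤ P.getD k 0 ∧ ∀ i : Nat, i < k → P.getD i 0 < v := by
  induction P generalizing k with
  | nil => simp [fge]
  | cons x xs ih =>
    by_cases hx : v ≤ x
    · simp only [fge, if_pos hx]
      constructor
      · rintro h; cases h
        refine ⟨by simp, by simpa [List.getD], by omega⟩
      · rintro ⟨hk, hv, hlt⟩
        cases k with
        | zero => rfl
        | succ n =>
          exact absurd hx (by simpa [List.getD] using hlt 0 (by omega) |>.not_ge)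
    · simp only [fge, if_neg hx]
      cases k with
      | zero =>
        simp only [Option.map_eq_some_iff]
        constructor
        · rintro ⟨a, _, h⟩; omega
        · rintro ⟨_, hv, _⟩
          simp [List.getD] at hv
          exact absurd hv hx
      | succ n =>
        rw [Option.map_eq_some_iff]
        constructor
        · rintro ⟨a, ha, he⟩
          have han : a = n := by omega
          rw [han] at ha
          obtain ⟨h1, h2, h3⟩ := (ih n).mp ha
          refine ⟨by simpa using h1, by simpa [List.getD] using h2, ?_⟩
          intro i hi
          cases i with
          | zero => simpa [List.getD] using (by omega : x < v)
          | succ m => simpa [List.getD] using h3 m (by omega)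
        · rintro ⟨h1, h2, h3⟩
          refine ⟨n, (ih n).mpr ⟨by simpa using h1, by simpa [List.getD] using h2, ?_⟩, rfl⟩
          intro i hi
          simpa [List.getD] using h3 (i + 1) (by omega)

theorem getD_append_right' (l1 l2 : List Int) (n : Nat) (h : l1.length ≤ n) :
    (l1 ++ l2).getD n 0 = l2.getD (n - l1.length) 0 := by
  simp [List.getD, List.getElem?_append_right h]

theorem fold_pm (ys : List Int) : ∀ (pre : List Int) (m : Int),
    (PySem.List.pyRange ((pre.length : Int) + 1) ((pre.length : Int) + 1 + (ys.length : Int)) 1).foldl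
      (fun xs i =>
        PySem.List.pySetD xs i (max (PySem.List.pyGetD xs (i - 1) 0) (PySem.List.pyGetD xs i 0)))
      (pre ++ m :: ys)
    = pre ++ m :: pm m ys := by
  induction ys with
  | nil =>
    intro pre m
    rw [PySem.List.pyRange_one_eq_nil (by simp)]
    simp [pm]
  | cons y ys ih =>
    intro pre m
    rw [PySem.List.pyRange_one_cons (by push_cast [List.length_cons]; omega)]
    rw [List.foldl_cons]
    have e1 : ((pre.length : Int) + 1) - 1 = ((pre.length : Nat) : Int) := by ring
    have g1 : PySem.List.pyGetD (pre ++ m :: y :: ys) ((pre.length : Int) + 1 - 1) 0 = m := by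
      rw [e1, PySem.List.pyGetD_natCast, getD_append_right' pre _ _ (le_refl _)]
      simp [List.getD]
    have g2 : PySem.List.pyGetD (pre ++ m :: y :: ys) ((pre.length : Int) + 1) 0 = y := by
      have e2 : ((pre.length : Int) + 1) = (((pre.length + 1 : Nat)) : Int) := by push_cast; ring
      rw [e2, PySem.List.pyGetD_natCast,
          getD_append_right' pre (m :: y :: ys) (pre.length + 1) (by omega)]
      simp [List.getD]
    have e2' : ((pre.length : Int) + 1) = (((pre.length + 1 : Nat)) : Int) := by push_cast; ring
    rw [g1, g2, e2', PySem.List.pySetD_natCast, List.set_append_right _ _ (by omega)]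
    have e4 : pre.length + 1 - pre.length = 1 := by omega
    rw [e4]
    simp only [List.set]
    have st : pre ++ m :: max m y :: ys = (pre ++ [m]) ++ max m y :: ys := by simp
    have r1 : (((pre.length + 1 : Nat) : Int) + 1) = (((pre ++ [m]).length : Int) + 1) := by
      simp
    have r2 : (((pre.length + 1 : Nat) : Int) + ((y :: ys).length : Int)) =
        (((pre ++ [m]).length : Int) + 1 + (ys.length : Int)) := by
      simp
      push_cast
      ring
    rw [st, r1, r2, ih (pre ++ [m]) (max m y)]
    simp [pm]

theorem pmax_nil : pmax [] = [] := by
  rw [pmax, PySem.List.pyRange_one_eq_nil (by simp)]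
  rfl

theorem pmax_cons (a : Int) (as : List Int) : pmax (a :: as) = a :: pm a as := by
  have := fold_pm as [] a
  simpa [pmax, PySem.List.len_eq, add_comm] using this

theorem pm_mem_le (xs : List Int) : ∀ m z : Int, z ∈ pm m xs → m ≤ z := by
  induction xs with
  | nil => intro m z h; simp [pm] at h
  | cons x xs ih =>
    intro m z h
    rw [pm, List.mem_cons] at h
    rcases h with rfl | h
    · exact le_max_left m x
    · exact le_trans (le_max_left m x) (ih (max m x) z h)

theorem pm_pairwise (xs : List Int) : ∀ m : Int, (m :: pm m xs).Pairwise (· ≤ ·) := by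
  induction xs with
  | nil => intro m; simp [pm]
  | cons x xs ih =>
    intro m
    rw [pm, List.pairwise_cons]
    refine ⟨?_, ih (max m x)⟩
    intro z hz
    rw [List.mem_cons] at hz
    rcases hz with rfl | hz
    · exact le_max_left m x
    · exact le_trans (le_max_left m x) (pm_mem_le xs (max m x) z hz)

theorem pmax_mono (A : List Int) :
    ∀ i j : Nat, i ≤ j → j < (pmax A).length → (pmax A).getD i 0 ≤ (pmax A).getD j 0 := by
  intro i j hij hj
  rcases eq_or_lt_of_le hij with rfl | hlt
  · exact le_refl _
  cases A with
  | nil => simp [pmax_nil] at hj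
  | cons a as =>
    rw [pmax_cons] at hj ⊢
    have hp : (a :: pm a as).Pairwise (· ≤ ·) := pm_pairwise as a
    have hi : i < (a :: pm a as).length := by omega
    rw [List.getD_eq_getElem _ _ hi, List.getD_eq_getElem _ _ hj]
    exact List.pairwise_iff_getElem.mp hp i j hi hj hlt

theorem bs_exit (P : List Int) (v : Int) (s l r : Int) (hl : 0 ≤ l) (hr : r < (P.length : Int))
    (hlr : r < l)
    (hb : ∀ i : Nat, i < P.length → (i : Int) < l → P.getD i 0 < v)
    (hnone : fge v P = none → s = -1)
    (hsome : ∀ k : Nat, fge v P = some k → r < (k : Int) → s = (k : Int)) :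
    s = F P v := by
  cases hfge : fge v P with
  | none => simp [F, hfge, hnone hfge]
  | some k =>
    obtain ⟨hk1, hk2, hk3⟩ := (fge_some_iff v P k).mp hfge
    have hlk : l ≤ (k : Int) := by
      by_contra h
      push_neg at h
      have := hb k hk1 h
      omega
    simp [F, hfge, hsome k hfge (by omega)]

theorem bsLoop_eq (P : List Int) (v : Int)
    (hm_ : ∀ i j : Nat, i ≤ j → j < P.length → P.getD i 0 ≤ P.getD j 0) :
    ∀ (N : Nat) (s l r : Int), (r + 1 - l).toNat ≤ N → 0 ≤ l → r < (P.length : Int) →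
      (∀ i : Nat, i < P.length → (i : Int) < l → P.getD i 0 < v) →
      (fge v P = none → s = -1) →
      (∀ k : Nat, fge v P = some k → r < (k : Int) → s = (k : Int)) →
      bsLoop P v s l r = F P v := by
  intro N
  induction N with
  | zero =>
    intro s l r hN hl hr hb hnone hsome
    rw [bsLoop, dif_neg (by omega)]
    exact bs_exit P v s l r hl hr (by omega) hb hnone hsome
  | succ N ih =>
    intro s l r hN hl hr hb hnone hsome
    by_cases hlr : l ≤ r
    · rw [bsLoop, dif_pos hlr]
      have hfd : PySem.Int.floordiv (r - l) 2 = (r - l) / 2 :=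
        PySem.Int.floordiv_eq_ediv_of_pos (by omega)
      set m : Int := l + PySem.Int.floordiv (r - l) 2 with hm
      have hm' : m = l + (r - l) / 2 := by rw [hm, hfd]
      have hml : l ≤ m := by omega
      have hmr : m ≤ r := by omega
      have h0m : 0 ≤ m := le_trans hl hml
      have hmn : m < (P.length : Int) := lt_of_le_of_lt hmr hr
      have hmN : m = ((m.toNat : Nat) : Int) := by omega
      have hg : PySem.List.pyGetD P m 0 = P.getD m.toNat 0 := by
        rw [hmN, PySem.List.pyGetD_natCast, Int.toNat_natCast]
      rw [hg]
      by_cases hv : v ≤ P.getD m.toNat 0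
      · rw [if_pos hv]
        have hne : fge v P ≠ none := by
          intro h
          have := (fge_none_iff v P).mp h m.toNat (by omega)
          omega
        obtain ⟨k, hk⟩ : ∃ k, fge v P = some k := by
          cases hfge : fge v P with
          | none => exact absurd hfge hne
          | some k => exact ⟨k, rfl⟩
        obtain ⟨hk1, hk2, hk3⟩ := (fge_some_iff v P k).mp hk
        have hkm : k ≤ m.toNat := by
          by_contra h
          push_neg at h
          have := hk3 m.toNat h
          omega
        apply ih m l (m - 1) (by omega) hl (by omega) hb
        · intro h; rw [h] at hk; cases hk
        · intro k' hk' hlt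
          rw [hk] at hk'
          have : k' = k := by injection hk'; omega
          subst this
          omega
      · rw [if_neg hv]
        apply ih s (m + 1) r (by omega) (by omega) hr
        · intro i hi hilt
          have hle : P.getD i 0 ≤ P.getD m.toNat 0 := hm_ i m.toNat (by omega) (by omega)
          omega
        · exact hnone
        · exact hsome
    · rw [bsLoop, dif_neg hlr]
      exact bs_exit P v s l r hl hr (by omega) hb hnone hsome

theorem solve_eq_map (A B : List Int) : solve A B = B.map (fun v => F (pmax A) v) := by
  simp only [solve, PySem.List.len_eq]
  rw [PySem.List.foldl_append_singleton_eq_map]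
  rw [show (fun i => bsLoop (pmax A) (PySem.List.pyGetD B i 0) (-1) 0 (((pmax A).length : Int) - 1))
      = (fun v => bsLoop (pmax A) v (-1) 0 (((pmax A).length : Int) - 1)) ∘
        (fun j => PySem.List.pyGetD B j 0) from rfl]
  rw [← List.map_map, PySem.List.map_pyGetD_pyRange_zero']
  simp only [List.nil_append]
  apply List.map_congr_left
  intro v _
  apply bsLoop_eq (pmax A) v (pmax_mono A) (((pmax A).length : Int) - 1 + 1 - 0).toNat
    (-1) 0 (((pmax A).length : Int) - 1) (le_refl _) (le_refl 0) (by omega)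
  · intro i _ hi
    omega
  · intro _; rfl
  · intro k hk hlt
    obtain ⟨hk1, _, _⟩ := (fge_some_iff v (pmax A) k).mp hk
    omega

theorem adv_stop (P : List Int) (v p : Int) (h0 : 0 ≤ p) (hpn : p ≤ (P.length : Int))
    (hb : ∀ i : Nat, i < P.length → (i : Int) < p → P.getD i 0 < v)
    (hstop : ¬(p < (P.length : Int) ∧ PySem.List.pyGetD P p 0 < v)) :
    (if p < (P.length : Int) then p else -1) = F P v := by
  have hpg : PySem.List.pyGetD P p 0 = P.getD p.toNat 0 := by
    rw [show p = ((p.toNat : Nat) : Int) from by omega, PySem.List.pyGetD_natCast,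
        Int.toNat_natCast]
  by_cases hpl : p < (P.length : Int)
  · rw [if_pos hpl]
    have hv : v ≤ P.getD p.toNat 0 := by
      rcases not_and_or.mp hstop with h | h
      · exact absurd hpl h
      · rw [hpg] at h; omega
    have : fge v P = some p.toNat :=
      (fge_some_iff v P p.toNat).mpr ⟨by omega, hv, fun i hi => hb i (by omega) (by omega)⟩
    simp [F, this]
    omega
  · rw [if_neg hpl]
    have : fge v P = none :=
      (fge_none_iff v P).mpr (fun i hi => hb i hi (by omega))
    simp [F, this]

theorem adv_eq (P : List Int) (v : Int) :
    ∀ (N : Nat) (p : Int), ((P.length : Int) - p).toNat ≤ N → 0 ≤ p → p ≤ (P.length : Int) →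
      (∀ i : Nat, i < P.length → (i : Int) < p → P.getD i 0 < v) →
      p ≤ adv P (P.length : Int) v p ∧ adv P (P.length : Int) v p ≤ (P.length : Int) ∧
      (∀ i : Nat, i < P.length → (i : Int) < adv P (P.length : Int) v p → P.getD i 0 < v) ∧
      (if adv P (P.length : Int) v p < (P.length : Int) then adv P (P.length : Int) v p else -1)
        = F P v := by
  intro N
  induction N with
  | zero =>
    intro p hN h0 hpn hb
    have hstop : ¬(p < (P.length : Int) ∧ PySem.List.pyGetD P p 0 < v) := by
      intro h; omega
    rw [adv, dif_neg hstop]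
    exact ⟨le_refl _, hpn, hb, adv_stop P v p h0 hpn hb hstop⟩
  | succ N ih =>
    intro p hN h0 hpn hb
    by_cases hc : p < (P.length : Int) ∧ PySem.List.pyGetD P p 0 < v
    · rw [adv, dif_pos hc]
      have hpg : PySem.List.pyGetD P p 0 = P.getD p.toNat 0 := by
        rw [show p = ((p.toNat : Nat) : Int) from by omega, PySem.List.pyGetD_natCast,
            Int.toNat_natCast]
      have hb' : ∀ i : Nat, i < P.length → (i : Int) < p + 1 → P.getD i 0 < v := by
        intro i hi hilt
        by_cases hip : (i : Int) < p
        · exact hb i hi hip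
        · have : i = p.toNat := by omega
          rw [this, ← hpg]
          exact hc.2
      obtain ⟨h1, h2, h3, h4⟩ := ih (p + 1) (by omega) (by omega) (by omega) hb'
      exact ⟨by omega, h2, h3, h4⟩
    · rw [adv, dif_neg hc]
      exact ⟨le_refl _, hpn, hb, adv_stop P v p h0 hpn hb hc⟩

def stepB (P B : List Int) (st : Int × List Int) (j : Int) : Int × List Int :=
  let q := adv P (P.length : Int) (PySem.List.pyGetD B j 0) st.1
  (q, PySem.List.pySetD st.2 j (if q < (P.length : Int) then q else -1))

theorem foldB_eq (P B : List Int) :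
    ∀ (js : List Int) (p : Int) (ans : List Int),
      0 ≤ p → p ≤ (P.length : Int) →
      (∀ j ∈ js, 0 ≤ j ∧ j < (B.length : Int)) →
      js.Pairwise (fun a b => PySem.List.pyGetD B a 0 ≤ PySem.List.pyGetD B b 0) →
      js.Nodup →
      (∀ j ∈ js, ∀ i : Nat, i < P.length → (i : Int) < p → P.getD i 0 < PySem.List.pyGetD B j 0) →
      ans.length = B.length →
      (∀ k : Nat, k < B.length → (k : Int) ∉ js → ans.getD k 0 = F P (B.getD k 0)) →
      (js.foldl (stepB P B) (p, ans)).2.length = B.length ∧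
      ∀ k : Nat, k < B.length →
        (js.foldl (stepB P B) (p, ans)).2.getD k 0 = F P (B.getD k 0) := by
  intro js
  induction js with
  | nil =>
    intro p ans h0 hpn hmem hpw hnd hbelow hlen hans
    exact ⟨hlen, fun k hk => hans k hk (by simp)⟩
  | cons j js ih =>
    intro p ans h0 hpn hmem hpw hnd hbelow hlen hans
    obtain ⟨hj0, hjB⟩ := hmem j (List.mem_cons_self)
    have hjN : j = ((j.toNat : Nat) : Int) := by omega
    rcases List.pairwise_cons.mp hpw with ⟨hhead, htail⟩
    rcases List.nodup_cons.mp hnd with ⟨hjnot, hnd'⟩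
    rw [List.foldl_cons]
    rw [show stepB P B (p, ans) j =
        (adv P (P.length : Int) (PySem.List.pyGetD B j 0) p,
         ans.set j.toNat
           (if adv P (P.length : Int) (PySem.List.pyGetD B j 0) p < (P.length : Int) then
              adv P (P.length : Int) (PySem.List.pyGetD B j 0) p else -1)) from by
      simp only [stepB]
      rw [hjN, PySem.List.pySetD_natCast, Int.toNat_natCast]]
    obtain ⟨hq1, hq2, hq3, hq4⟩ :=
      adv_eq P (PySem.List.pyGetD B j 0) ((P.length : Int) - p).toNat p (le_refl _) h0 hpn
        (fun i hi hilt => hbelow j (List.mem_cons_self) i hi hilt)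
    refine ih _ _ (by omega) hq2 (fun j' hj' => hmem j' (List.mem_cons_of_mem _ hj')) htail hnd'
      ?_ (by rw [List.length_set]; exact hlen) ?_
    · intro j' hj' i hi hilt
      exact lt_of_lt_of_le (hq3 i hi hilt) (hhead j' hj')
    · intro k hk hknot
      by_cases hkj : k = j.toNat
      · rw [hkj]
        rw [List.getD_eq_getElem _ _ (by rw [List.length_set]; omega)]
        rw [List.getElem_set_self]
        rw [hq4]
        rw [hjN, PySem.List.pyGetD_natCast, Int.toNat_natCast]
      · have : (k : Int) ∉ j :: js := by
          intro hmem'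
          rcases List.mem_cons.mp hmem' with he | he
          · omega
          · exact hknot he
        have hget : ∀ z : Int, (ans.set j.toNat z).getD k 0 = ans.getD k 0 := by
          intro z
          simp [List.getD, List.getElem?_set_ne (by omega : j.toNat ≠ k)]
        rw [hget]
        exact hans k hk this

theorem solve_alt_eq_map (A B : List Int) : solve_alt A B = B.map (fun v => F (pmax A) v) := by
  have h0 : solve_alt A B =
      ((PySem.List.sorted (PySem.List.pyRange 0 ((B.length : Int)) 1)
          (fun j => PySem.List.pyGetD B j 0) false).foldl (stepB (pmax A) B)
        ((0 : Int), List.replicate B.length (-1))).2 := by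
    simp only [solve_alt, PySem.List.len_eq]
    rfl
  rw [h0]
  have hmem : ∀ j ∈ PySem.List.sorted (PySem.List.pyRange 0 ((B.length : Int)) 1)
      (fun j => PySem.List.pyGetD B j 0) false, 0 ≤ j ∧ j < (B.length : Int) := by
    intro j hj
    rw [PySem.List.mem_sorted] at hj
    exact PySem.List.mem_pyRange_one.mp hj
  have hnd : (PySem.List.sorted (PySem.List.pyRange 0 ((B.length : Int)) 1)
      (fun j => PySem.List.pyGetD B j 0) false).Nodup :=
    (PySem.List.sorted_perm _ _ _).nodup_iff.mpr (PySem.List.nodup_pyRange_one _ _)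
  obtain ⟨hL, hK⟩ := foldB_eq (pmax A) B
    (PySem.List.sorted (PySem.List.pyRange 0 ((B.length : Int)) 1)
      (fun j => PySem.List.pyGetD B j 0) false)
    0 (List.replicate B.length (-1)) (le_refl 0) (by omega) hmem
    (PySem.List.sorted_pairwise _ _)
    hnd
    (by intro j _ i _ hi; omega)
    (by simp)
    (by
      intro k hk hknot
      exact absurd ((PySem.List.mem_sorted _ _ _ _).mpr
        (PySem.List.mem_pyRange_one.mpr ⟨by omega, by omega⟩)) hknot)
  apply List.ext_getElem (by simp [hL])
  intro k hk1 hk2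
  have hkB : k < B.length := by rw [hL] at hk1; exact hk1
  have := hK k hkB
  rw [List.getD_eq_getElem _ _ hk1, List.getD_eq_getElem _ _ hkB] at this
  simp only [List.getElem_map]
  exact this

-- ===== VERDICT (by name: the statement is the Claim_ definition above) =====
theorem solve_spec : Claim_equal_solve := by
  intro A B _
  unfold Spec_solve
  rw [solve_eq_map, solve_alt_eq_map]
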